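-- pv_equiv track=rewrite | github.com/sunminky/algorythmStudy | 알고리즘 스터디/개인공부/TwoPointer/PermutationSummation.py | accumulation
-- ===== SOURCE A (Python) =====
-- def accumulation(number):
--     result = dict()
--
--     for i in range(len(number)):
--         total = 0
--         for j in range(i, len(number)):
--             total += number[j]
--             result[total] = result.get(total, 0) + 1    # 이 부분합이 나올 수 있는 경우의 수를 구함
--
--     return result
-- ===== SOURCE B (Python) =====
-- def accumulation(number):
--     # Prefix-sum table: P[k] = sum of the first k elements.
--     P = [0]
--     for x in number:
--         P.append(P[-1] + x)
--     result = dict()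
--     for a in range(len(P)):
--         for b in range(a + 1, len(P)):
--             s = P[b] - P[a]
--             result[s] = result.get(s, 0) + 1
--     return result
-- ===== Notes on version B (the rewrite author's own statement) =====
-- stated objective: alternative
-- what changed: B first builds a prefix-sum table P in one pass and then counts each subarray sum as a difference P[b]-P[a] over index pairs, instead of A's running-accumulator inner loop; insertion order of the dict is preserved.
import Mathlib
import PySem

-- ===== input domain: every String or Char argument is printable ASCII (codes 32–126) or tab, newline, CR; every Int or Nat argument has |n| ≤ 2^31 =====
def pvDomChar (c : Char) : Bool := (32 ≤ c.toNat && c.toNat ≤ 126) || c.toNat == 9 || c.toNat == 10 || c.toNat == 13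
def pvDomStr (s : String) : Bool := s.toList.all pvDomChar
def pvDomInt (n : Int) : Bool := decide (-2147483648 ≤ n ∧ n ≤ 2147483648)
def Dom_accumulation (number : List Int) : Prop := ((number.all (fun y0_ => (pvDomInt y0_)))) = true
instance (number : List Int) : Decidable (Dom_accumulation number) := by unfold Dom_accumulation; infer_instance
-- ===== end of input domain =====

-- B replaces A's running-accumulator inner loop by a precomputed prefix-sum table and a difference-based double loop (same O(n^2) cost, different decomposition).

-- ===== PORT A =====
def aInner (number : List Int) (i : Int) (result : PySem.Dict Int Int) : PySem.Dict Int Int :=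
  ((PySem.List.pyRange i (number.length : Int) 1).foldl
    (fun (st : Int × PySem.Dict Int Int) j =>
      let total := st.1 + PySem.List.pyGetD number j 0
      (total, st.2.insert total (st.2.getD total 0 + 1)))
    ((0 : Int), result)).2

def accumulation (number : List Int) : List (Int × Int) :=
  ((PySem.List.pyRange 0 (number.length : Int) 1).foldl
    (fun result i => aInner number i result) PySem.Dict.empty).items

-- ===== PORT B =====
def bPrefix (number : List Int) : List Int :=
  number.foldl (fun P x => P ++ [(PySem.List.pyGet? P (-1)).getD 0 + x]) [0]

def bInner (P : List Int) (a : Int) (result : PySem.Dict Int Int) : PySem.Dict Int Int :=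
  (PySem.List.pyRange (a + 1) (P.length : Int) 1).foldl
    (fun result b =>
      let s := PySem.List.pyGetD P b 0 - PySem.List.pyGetD P a 0
      result.insert s (result.getD s 0 + 1)) result

def accumulation_alt (number : List Int) : List (Int × Int) :=
  let P := bPrefix number
  ((PySem.List.pyRange 0 (P.length : Int) 1).foldl
    (fun result a => bInner P a result) PySem.Dict.empty).items

-- ===== PRECONDITION & SPEC =====
def Spec_accumulation (number : List Int) (out : List (Int × Int)) : Prop := out = accumulation_alt number
instance (number : List Int) (out : List (Int × Int)) : Decidable (Spec_accumulation number out) := by unfold Spec_accumulation; infer_instance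

-- ===== CLAIM (what is proved, stated in full; the proofs are below) =====
def Claim_equal_accumulation : Prop := ∀ (number : List Int), Dom_accumulation number → Spec_accumulation number (accumulation number)

-- ===== LEMMAS AND PROOFS =====

-- proof-only model of B's prefix list
def pfx : Int → List Int → List Int
  | a, [] => [a]
  | a, x :: xs => a :: pfx (a + x) xs

theorem pfx_build (l : List Int) : ∀ (acc : List Int) (a : Int),
    l.foldl (fun P x => P ++ [(PySem.List.pyGet? P (-1)).getD 0 + x]) (acc ++ [a])
      = acc ++ pfx a l := by
  induction l with
  | nil => intro acc a; simp [pfx]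
  | cons x xs ih =>
    intro acc a
    have h1 : (acc ++ [a]) ++ [(PySem.List.pyGet? (acc ++ [a]) (-1)).getD 0 + x]
        = (acc ++ [a]) ++ [a + x] := by
      rw [PySem.List.pyGet?_neg_one]
      simp
    simp only [List.foldl_cons, h1]
    rw [List.append_assoc] at *
    have := ih (acc ++ [a]) (a + x)
    simpa [pfx] using this

theorem bPrefix_eq_pfx (number : List Int) : bPrefix number = pfx 0 number := by
  have := pfx_build number [] 0
  simpa [bPrefix] using this

theorem pfx_length (l : List Int) : ∀ a, (pfx a l).length = l.length + 1 := by
  induction l with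
  | nil => intro a; simp [pfx]
  | cons x xs ih => intro a; simp [pfx, ih]

theorem pfx_get (l : List Int) : ∀ (a : Int) (k : Nat), k ≤ l.length →
    PySem.List.pyGetD (pfx a l) (k : Int) 0 = a + (l.take k).sum := by
  induction l with
  | nil =>
    intro a k hk
    have hk0 : k = 0 := Nat.le_zero.mp hk
    subst hk0
    simp [pfx]
  | cons x xs ih =>
    intro a k hk
    cases k with
    | zero => simp [pfx]
    | succ k =>
      have hk' : k ≤ xs.length := by simpa using hk
      have := ih (a + x) k hk'
      rw [PySem.List.pyGetD_natCast] at this ⊢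
      simp only [pfx, List.take_succ_cons, List.sum_cons]
      simpa [add_assoc] using this

-- the core step-by-step correspondence of the two inner loops
theorem inner_eq (number : List Int) (i : Nat) (hi : i ≤ number.length) :
    ∀ (m j : Nat) (t : Int) (d : PySem.Dict Int Int), j + m = number.length →
      t = (number.take j).sum - (number.take i).sum →
    ((PySem.List.pyRange (j : Int) (number.length : Int) 1).foldl
      (fun (st : Int × PySem.Dict Int Int) j =>
        let total := st.1 + PySem.List.pyGetD number j 0
        (total, st.2.insert total (st.2.getD total 0 + 1))) (t, d)).2
    = (PySem.List.pyRange ((j : Int) + 1) (((bPrefix number).length : Int)) 1).foldl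
      (fun result b =>
        let s := PySem.List.pyGetD (bPrefix number) b 0
                 - PySem.List.pyGetD (bPrefix number) (i : Int) 0
        result.insert s (result.getD s 0 + 1)) d := by
  have hplen : ((bPrefix number).length : Int) = (number.length : Int) + 1 := by
    rw [bPrefix_eq_pfx, pfx_length]; push_cast; ring
  intro m
  induction m with
  | zero =>
    intro j t d hjm ht
    have hj : (j : Int) = (number.length : Int) := by omega
    rw [hj, hplen, PySem.List.pyRange_one_eq_nil (le_refl _),
        PySem.List.pyRange_one_eq_nil (le_refl _)]
    rfl
  | succ m ihm =>
    intro j t d hjm ht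
    have hjn : j < number.length := by omega
    have hA : PySem.List.pyRange (j : Int) (number.length : Int) 1
        = (j : Int) :: PySem.List.pyRange ((j : Int) + 1) (number.length : Int) 1 :=
      PySem.List.pyRange_one_cons (by exact_mod_cast hjn)
    have hB : PySem.List.pyRange ((j : Int) + 1) (((bPrefix number).length : Int)) 1
        = ((j : Int) + 1) :: PySem.List.pyRange ((j : Int) + 1 + 1) (((bPrefix number).length : Int)) 1 := by
      rw [hplen]; exact PySem.List.pyRange_one_cons (by exact_mod_cast (by omega : (j:Int) + 1 < (number.length:Int) + 1))
    rw [hA, hB]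
    simp only [List.foldl_cons]
    have hnum : PySem.List.pyGetD number (j : Int) 0 = number[j] := by
      rw [PySem.List.pyGetD_natCast]; simp [List.getD_eq_getElem?_getD, hjn]
    have hsum : (number.take (j + 1)).sum = (number.take j).sum + number[j] :=
      List.sum_take_succ number j hjn
    have hPi : PySem.List.pyGetD (bPrefix number) (i : Int) 0 = (number.take i).sum := by
      rw [bPrefix_eq_pfx]; simpa using pfx_get number 0 i hi
    have hPj : PySem.List.pyGetD (bPrefix number) ((j : Int) + 1) 0 = (number.take (j + 1)).sum := by
      rw [bPrefix_eq_pfx]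
      have := pfx_get number 0 (j + 1) (by omega)
      push_cast at this ⊢
      simpa using this
    have htot : t + PySem.List.pyGetD number (j : Int) 0
        = PySem.List.pyGetD (bPrefix number) ((j : Int) + 1) 0
          - PySem.List.pyGetD (bPrefix number) (i : Int) 0 := by
      rw [hnum, hPi, hPj, ht, hsum]; ring
    rw [htot]
    have hcast : ((j : Int) + 1) = ((j + 1 : Nat) : Int) := by push_cast; ring
    rw [hcast]
    exact ihm (j + 1)
      (PySem.List.pyGetD (bPrefix number) (((j + 1 : Nat) : Int)) 0
        - PySem.List.pyGetD (bPrefix number) (i : Int) 0)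
      _ (by omega)
      (by rw [← hcast, hPj, hPi])

theorem inner_main (number : List Int) (i : Nat) (hi : i ≤ number.length)
    (d : PySem.Dict Int Int) :
    aInner number (i : Int) d = bInner (bPrefix number) (i : Int) d := by
  unfold aInner bInner
  have := inner_eq number i hi (number.length - i) i 0 d (by omega) (by ring)
  simpa using this

theorem accumulation_eq (number : List Int) :
    accumulation number = accumulation_alt number := by
  unfold accumulation accumulation_alt
  show _ = ((PySem.List.pyRange 0 (((bPrefix number).length : Int)) 1).foldl
    (fun result a => bInner (bPrefix number) a result) PySem.Dict.empty).items
  have hplen : ((bPrefix number).length : Int) = (number.length : Int) + 1 := by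
    rw [bPrefix_eq_pfx, pfx_length]; push_cast; ring
  rw [hplen, PySem.List.pyRange_one_succ_right (by positivity), List.foldl_append]
  simp only [List.foldl_cons, List.foldl_nil]
  have hlast : ∀ d, bInner (bPrefix number) ((number.length : Nat) : Int) d = d := by
    intro d
    unfold bInner
    rw [hplen, PySem.List.pyRange_one_eq_nil (le_refl _)]
    rfl
  rw [hlast]
  congr 1
  apply PySem.List.foldl_congr_mem
  intro d x hx
  rw [PySem.List.mem_pyRange_one] at hx
  have h0 : (0 : Int) ≤ x := hx.1
  have hxn : x.toNat ≤ number.length := by omega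
  have hxe : x = ((x.toNat : Nat) : Int) := by omega
  rw [hxe]
  exact inner_main number x.toNat hxn d

-- ===== VERDICT (by name: the statement is the Claim_ definition above) =====
theorem accumulation_spec : Claim_equal_accumulation := by
  intro number _
  unfold Spec_accumulation
  rw [accumulation_eq]
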